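-- pv_equiv track=rewrite | github.com/Zevlek/Bubo | bubo_brain.py | _retry_output_tokens
-- ===== SOURCE A (Python) =====
-- MIN_SAFE_OUTPUT_TOKENS = 256
--
-- MAX_RETRY_OUTPUT_TOKENS = 2048
--
-- def _retry_output_tokens(base_tokens: int) -> list[int]:
--     base = max(MIN_SAFE_OUTPUT_TOKENS, min(MAX_RETRY_OUTPUT_TOKENS, int(base_tokens)))
--     budgets = [base]
--     if base < 512:
--         budgets.append(512)
--     if budgets[-1] < 1024:
--         budgets.append(1024)
--     if budgets[-1] < MAX_RETRY_OUTPUT_TOKENS: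
--         budgets.append(MAX_RETRY_OUTPUT_TOKENS)
--     # Deduplicate while preserving order.
--     seen = set()
--     out = []
--     for b in budgets:
--         if b in seen:
--             continue
--         out.append(b)
--         seen.add(b)
--     return out
-- ===== SOURCE B (Python) =====
-- MIN_SAFE_OUTPUT_TOKENS = 256
--
-- MAX_RETRY_OUTPUT_TOKENS = 2048
--
-- def _retry_output_tokens(base_tokens: int) -> list[int]:
--     base = max(MIN_SAFE_OUTPUT_TOKENS, min(MAX_RETRY_OUTPUT_TOKENS, int(base_tokens)))
--     # Walk the doubling ladder downward from the cap, prepending each rung that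
--     # is still above the clamped base; the output is built back-to-front.
--     ladder = []
--     t = MAX_RETRY_OUTPUT_TOKENS
--     while t > base and t >= 512:
--         ladder = [t] + ladder
--         t //= 2
--     return [base] + ladder
-- ===== Notes on version B (the rewrite author's own statement) =====
-- stated objective: alternative
-- what changed: Instead of A's forward cascade of conditional appends keyed on the growing list's last element plus a dead seen-set dedup pass, B walks the doubling ladder downward from the 2048 cap, halving each step and prepending every rung still above the clamped base, building the tail back-to-front.
import Mathlib
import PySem

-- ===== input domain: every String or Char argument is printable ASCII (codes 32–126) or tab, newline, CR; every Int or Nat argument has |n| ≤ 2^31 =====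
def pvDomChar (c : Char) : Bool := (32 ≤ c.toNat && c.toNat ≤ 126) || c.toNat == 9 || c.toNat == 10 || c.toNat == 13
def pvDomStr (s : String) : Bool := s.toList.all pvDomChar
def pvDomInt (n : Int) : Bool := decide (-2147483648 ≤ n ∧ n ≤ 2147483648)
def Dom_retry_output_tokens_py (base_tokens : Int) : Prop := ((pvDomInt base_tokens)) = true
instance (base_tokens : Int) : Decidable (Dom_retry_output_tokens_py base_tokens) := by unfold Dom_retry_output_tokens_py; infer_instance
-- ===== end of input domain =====

-- B replaces A's forward cascade of conditional appends (plus its dead dedup pass) by a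
-- descending halving walk from the 2048 cap that prepends each rung above the clamped base;
-- objective: alternative decomposition, same O(1) cost.

-- ===== PORT A =====
-- literal port of A: clamp, conditional appends testing budgets[-1], then the dedup loop
def retry_output_tokens_py (base_tokens : Int) : List Int :=
  let base := max 256 (min 2048 base_tokens)
  let budgets := [base]
  let budgets := if base < 512 then budgets ++ [512] else budgets
  let budgets := if budgets.getLast! < 1024 then budgets ++ [1024] else budgets
  let budgets := if budgets.getLast! < 2048 then budgets ++ [2048] else budgets
  -- deduplicate while preserving order
  let step := fun (st : PySem.Set Int × List Int) (b : Int) =>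
    if st.1.contains b then st else (st.1.add b, st.2 ++ [b])
  (budgets.foldl step (PySem.Set.empty, [])).2

-- ===== PORT B =====
-- the while loop of Source B: t halves each step, so toNat t is the fuel (at most 12 steps needed)
def pvAltLadder (base : Int) (t : Int) : Nat → List Int
  | 0 => []
  | fuel + 1 =>
    if t > base ∧ t ≥ 512 then pvAltLadder base (PySem.Int.floordiv t 2) fuel ++ [t]
    else []

def retry_output_tokens_py_alt (base_tokens : Int) : List Int :=
  let base := max 256 (min 2048 base_tokens)
  base :: pvAltLadder base 2048 12

-- ===== PRECONDITION & SPEC =====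
def Spec_retry_output_tokens_py (base_tokens : Int) (out : List Int) : Prop := out = retry_output_tokens_py_alt base_tokens
instance (base_tokens : Int) (out : List Int) : Decidable (Spec_retry_output_tokens_py base_tokens out) := by unfold Spec_retry_output_tokens_py; infer_instance

-- ===== CLAIM (what is proved, stated in full; the proofs are below) =====
def Claim_equal_retry_output_tokens_py : Prop := ∀ (base_tokens : Int), Dom_retry_output_tokens_py base_tokens → Spec_retry_output_tokens_py base_tokens (retry_output_tokens_py base_tokens)

-- ===== LEMMAS AND PROOFS =====

-- ===== VERDICT (by name: the statement is the Claim_ definition above) =====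
theorem retry_output_tokens_py_spec : Claim_equal_retry_output_tokens_py := by
  intro x _
  unfold Spec_retry_output_tokens_py retry_output_tokens_py retry_output_tokens_py_alt
  set base := max 256 (min 2048 x) with hbase
  have hlo : 256 ≤ base := le_max_left _ _
  have hhi : base ≤ 2048 := by
    rw [hbase]; exact max_le (by norm_num) (min_le_left _ _)
  by_cases h1 : base < 512
  · have n1 : ¬((512 : Int) = base) := by omega
    have n2 : ¬((1024 : Int) = base) := by omega
    have n3 : ¬((2048 : Int) = base) := by omega
    have h2 : base < 1024 := by omega
    have h3 : base < 2048 := by omega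
    have h4 : ¬((256 : Int) ≥ 512) := by norm_num
    simp [PySem.Set.contains, PySem.Set.add, PySem.Set.empty, List.foldl,
      List.getLast!, pvAltLadder, PySem.Int.floordiv, h1, h2, h3, h4, n1, n2, n3]
  · by_cases h2 : base < 1024
    · have n2 : ¬((1024 : Int) = base) := by omega
      have n3 : ¬((2048 : Int) = base) := by omega
      have h3 : base < 2048 := by omega
      have g1 : ¬((512 : Int) > base) := by omega
      simp [PySem.Set.contains, PySem.Set.add, PySem.Set.empty, List.foldl,
        List.getLast!, pvAltLadder, PySem.Int.floordiv, h1, h2, h3, n2, n3]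
    · by_cases h3 : base < 2048
      · have n3 : ¬((2048 : Int) = base) := by omega
        have g1 : ¬((1024 : Int) > base) := by omega
        simp [PySem.Set.contains, PySem.Set.add, PySem.Set.empty, List.foldl,
          List.getLast!, pvAltLadder, PySem.Int.floordiv, h1, h2, h3, n3]
      · have e3 : base = 2048 := by omega
        simp [PySem.Set.contains, PySem.Set.add, PySem.Set.empty, List.foldl,
          List.getLast!, pvAltLadder, e3]
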